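-- pv_equiv track=rewrite | github.com/rtviii/riboxyz | ribctl/lib/mod_transpose_bsites.py | forwards_match
-- ===== SOURCE A (Python) =====
-- def forwards_match(alnsrc:str, resid:int):
-- 	"""Returns the index of a source-sequence residue in the aligned source sequence.
-- 	Basically, "count forward including gaps"
-- 	"""
--
-- 	count_proper = 0
-- 	for alignment_indx,char in enumerate( alnsrc ):
-- 		if count_proper == resid:
-- 			return alignment_indx
-- 		if char =='-':
-- 			continue
-- 		else:
-- 			count_proper  +=1
-- ===== SOURCE B (Python) =====
-- def forwards_match(alnsrc: str, resid: int):
--     # Two-pass: build prefix table of non-gap counts, then search it.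
--     counts = [0]
--     acc = 0
--     for c in alnsrc:
--         if c != '-':
--             acc += 1
--         counts.append(acc)
--     try:
--         i = counts.index(resid)
--     except ValueError:
--         return None
--     return i if i < len(alnsrc) else None
-- ===== Notes on version B (the rewrite author's own statement) =====
-- stated objective: alternative
-- what changed: A's single fused count-and-check loop is replaced by building a prefix table of non-gap counts and then locating resid with list.index, guarded by i < len(alnsrc).
import Mathlib
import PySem

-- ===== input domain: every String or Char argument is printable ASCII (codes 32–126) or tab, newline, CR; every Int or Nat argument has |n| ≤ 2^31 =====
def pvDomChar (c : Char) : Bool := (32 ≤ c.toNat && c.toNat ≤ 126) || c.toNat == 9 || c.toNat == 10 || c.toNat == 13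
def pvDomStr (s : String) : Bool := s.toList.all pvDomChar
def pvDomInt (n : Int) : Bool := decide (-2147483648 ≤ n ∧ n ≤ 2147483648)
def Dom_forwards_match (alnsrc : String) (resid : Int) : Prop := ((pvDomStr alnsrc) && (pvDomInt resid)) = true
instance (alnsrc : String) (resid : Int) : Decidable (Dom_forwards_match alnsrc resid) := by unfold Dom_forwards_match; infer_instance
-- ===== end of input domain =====

-- B replaces A's fused counting loop with a prefix-count table plus list.index search (alternative decomposition, same cost).


-- ===== PORT A =====
-- the for-loop with early return: state = (alignment_indx, count_proper)
def fmGo : List Char → Int → Int → Int → Option Int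
  | [], _, _, _ => none
  | c :: rest, idx, count, resid =>
    if count = resid then some idx
    else if c = '-' then fmGo rest (idx + 1) count resid
    else fmGo rest (idx + 1) (count + 1) resid

def forwards_match (alnsrc : String) (resid : Int) : Option Int :=
  fmGo alnsrc.toList 0 0 resid

-- ===== PORT B =====
-- the table-building loop of Source B: running non-gap prefix counts after each char
def fmCounts : List Char → Int → List Int
  | [], _ => []
  | c :: rest, acc =>
    let acc' := if c ≠ '-' then acc + 1 else acc
    acc' :: fmCounts rest acc'

def forwards_match_alt (alnsrc : String) (resid : Int) : Option Int :=
  let counts : List Int := 0 :: fmCounts alnsrc.toList 0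
  match PySem.List.index? counts resid with
  | none => none
  | some i => if (i : Int) < alnsrc.toList.length then some (i : Int) else none

-- ===== PRECONDITION & SPEC =====
def Spec_forwards_match (alnsrc : String) (resid : Int) (out : Option Int) : Prop := out = forwards_match_alt alnsrc resid
instance (alnsrc : String) (resid : Int) (out : Option Int) : Decidable (Spec_forwards_match alnsrc resid out) := by unfold Spec_forwards_match; infer_instance

-- ===== CLAIM (what is proved, stated in full; the proofs are below) =====
def Claim_equal_forwards_match : Prop := ∀ (alnsrc : String) (resid : Int), Dom_forwards_match alnsrc resid → Spec_forwards_match alnsrc resid (forwards_match alnsrc resid)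

-- ===== LEMMAS AND PROOFS =====

-- core invariant: A's loop from state (idx, count) equals B's search over the table headed by count
theorem fmGo_eq_search (cs : List Char) : ∀ (idx count resid : Int),
    fmGo cs idx count resid =
      match PySem.List.index? (count :: fmCounts cs count) resid with
      | none => none
      | some i => if (i : Int) < cs.length then some (idx + i) else none := by
  induction cs with
  | nil =>
    intro idx count resid
    by_cases h : count = resid
    · subst h
      simp [fmGo, fmCounts]
    · have : fmCounts [] count = [] := rfl
      rw [this, PySem.List.index?_cons_of_ne _ h]
      simp [fmGo, PySem.List.index?]
  | cons c rest ih =>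
    intro idx count resid
    by_cases h : count = resid
    · subst h
      rw [PySem.List.index?_cons_self]
      simp [fmGo]
    · have hstep : fmCounts (c :: rest) count =
        (if c ≠ '-' then count + 1 else count) :: fmCounts rest (if c ≠ '-' then count + 1 else count) := by
        simp [fmCounts]
      have hlhs : fmGo (c :: rest) idx count resid =
          fmGo rest (idx + 1) (if c ≠ '-' then count + 1 else count) resid := by
        by_cases hc : c = '-'
        · simp [fmGo, if_neg h, hc]
        · simp [fmGo, if_neg h, hc]
      rw [hlhs, hstep, PySem.List.index?_cons_of_ne _ h,
        ih (idx + 1) (if c ≠ '-' then count + 1 else count) resid]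
      cases hix : PySem.List.index?
          ((if c ≠ '-' then count + 1 else count) :: fmCounts rest (if c ≠ '-' then count + 1 else count)) resid with
      | none => simp
      | some i =>
        simp only [Option.map_some, List.length_cons]
        by_cases hlt : (i : Int) < rest.length
        · rw [if_pos hlt, if_pos (by push_cast; omega)]
          congr 1
          push_cast
          ring
        · rw [if_neg hlt, if_neg (by push_cast; omega)]

-- ===== VERDICT (by name: the statement is the Claim_ definition above) =====
theorem forwards_match_spec : Claim_equal_forwards_match := by
  intro alnsrc resid _
  unfold Spec_forwards_match forwards_match
  rw [fmGo_eq_search]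
  simp only [forwards_match_alt]
  cases hix : PySem.List.index? ((0 : Int) :: fmCounts alnsrc.toList 0) resid with
  | none => simp
  | some i => simp
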